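-- pv_equiv track=rewrite | github.com/SJ-Leeee/algorithm-archive | 프로그래머스/3/42579. 베스트앨범/베스트앨범.py | solution
-- ===== SOURCE A (Python) =====
-- def solution(genres, plays):
--     streaming_genre = {}
--     genre_songs = {}
--
--     for i in range(len(genres)):
--         genre = genres[i]
--         stream_cnt = plays[i]
--         if genre in streaming_genre:  # 장르에 이미 들어온게 있다는 뜻
--             streaming_genre[genre] += stream_cnt
--             genre_songs[genre].append((i, stream_cnt))  # 장르에 곡추가
--         else:
--             streaming_genre[genre] = stream_cnt
--             genre_songs[genre] = [(i, stream_cnt)]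
--
--     sorted_genre = sorted(streaming_genre.items(), key=lambda x: x[1], reverse=True)
--
--     answer = []
--     for i in sorted_genre:
--         genre = i[0]
--         genre_songs[genre].sort(key=lambda x: x[1], reverse=True)
--         if len(genre_songs[genre]) < 2:
--             for i in genre_songs[genre]:  # (0,500, 2,150)
--                 answer.append(i[0])
--         else:
--             for i in range(2):  # (0,500, 2,150)
--                 answer.append(genre_songs[genre][i][0])
--
--     return answer
-- ===== SOURCE B (Python) =====
-- def solution(genres, plays):
--     totals = {}
--     for i in range(len(genres)):
--         totals[genres[i]] = totals.get(genres[i], 0) + plays[i]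
--     top2 = {}
--     for i in sorted(range(len(genres)), key=lambda i: plays[i], reverse=True):
--         cur = top2.get(genres[i], [])
--         if len(cur) < 2:
--             top2[genres[i]] = cur + [i]
--     answer = []
--     for genre, _ in sorted(totals.items(), key=lambda t: t[1], reverse=True):
--         answer += top2.get(genre, [])
--     return answer
-- ===== Notes on version B (the rewrite author's own statement) =====
-- stated objective: alternative
-- what changed: B drops A's per-genre song-list dict and per-genre sorts: it builds only the genre-total dict, sorts the song indices once globally by plays (stable, descending), keeps the first two indices seen per genre in one pass over that order, and emits them per genre sorted by totals.
import Mathlib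
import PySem

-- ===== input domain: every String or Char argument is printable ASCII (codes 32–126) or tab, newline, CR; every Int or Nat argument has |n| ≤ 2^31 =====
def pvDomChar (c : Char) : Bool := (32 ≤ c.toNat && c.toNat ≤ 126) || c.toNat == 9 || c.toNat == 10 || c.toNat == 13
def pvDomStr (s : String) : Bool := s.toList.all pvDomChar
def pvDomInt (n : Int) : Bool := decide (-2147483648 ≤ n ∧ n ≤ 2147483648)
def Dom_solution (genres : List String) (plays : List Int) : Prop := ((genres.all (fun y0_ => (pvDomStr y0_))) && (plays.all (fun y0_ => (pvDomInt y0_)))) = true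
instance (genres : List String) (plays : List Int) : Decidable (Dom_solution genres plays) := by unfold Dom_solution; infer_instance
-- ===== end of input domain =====

-- B replaces A's per-genre song lists and per-genre sorts by one global stable sort of the
-- song indices plus a single capped pass collecting each genre's first two indices
-- (objective: alternative decomposition; same asymptotic cost as A).

-- ===== PORT A =====
-- literal port of A; genres[i] / plays[i] ported as pyGetD (exact: 0 ≤ i < len(genres) ≤ len(plays) under Pre_)
def solution (genres : List String) (plays : List Int) : List Int :=
  let st :=
    (PySem.List.pyRange 0 (genres.length : Int) 1).foldl
      (fun (st : PySem.Dict String Int × PySem.Dict String (List (Int × Int))) i =>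
        let genre := PySem.List.pyGetD genres i ""
        let cnt := PySem.List.pyGetD plays i 0
        if st.1.contains genre then
          (st.1.insert genre (st.1.getD genre 0 + cnt),
           st.2.insert genre (st.2.getD genre [] ++ [(i, cnt)]))
        else
          (st.1.insert genre cnt, st.2.insert genre [(i, cnt)]))
      (PySem.Dict.empty, PySem.Dict.empty)
  let streaming := st.1
  let songs := st.2
  let sortedGenre := PySem.List.sorted streaming.items (fun x => x.2) true
  sortedGenre.foldl
    (fun answer gi =>
      let s := PySem.List.sorted (songs.getD gi.1 []) (fun x => x.2) true
      if s.length < 2 then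
        s.foldl (fun ans p => ans ++ [p.1]) answer
      else
        (PySem.List.pyRange 0 2 1).foldl
          (fun ans i => ans ++ [(PySem.List.pyGetD s i (0, 0)).1]) answer)
    []

-- ===== PORT B =====
def solution_alt (genres : List String) (plays : List Int) : List Int :=
  let totals :=
    (PySem.List.pyRange 0 (genres.length : Int) 1).foldl
      (fun (d : PySem.Dict String Int) i =>
        d.insert (PySem.List.pyGetD genres i "")
          (d.getD (PySem.List.pyGetD genres i "") 0 + PySem.List.pyGetD plays i 0))
      PySem.Dict.empty
  let top2 :=
    (PySem.List.sorted (PySem.List.pyRange 0 (genres.length : Int) 1)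
        (fun i => PySem.List.pyGetD plays i 0) true).foldl
      (fun (d : PySem.Dict String (List Int)) i =>
        let cur := d.getD (PySem.List.pyGetD genres i "") []
        if cur.length < 2 then d.insert (PySem.List.pyGetD genres i "") (cur ++ [i]) else d)
      PySem.Dict.empty
  (PySem.List.sorted totals.items (fun t => t.2) true).foldl
    (fun answer gi => answer ++ top2.getD gi.1 [])
    []

-- ===== PRECONDITION & SPEC =====
-- A reads plays[i] for every i < len(genres): it raises IndexError iff len(plays) < len(genres).
def Pre_solution (genres : List String) (plays : List Int) : Prop :=
  genres.length ≤ plays.length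
instance (genres : List String) (plays : List Int) : Decidable (Pre_solution genres plays) := by
  unfold Pre_solution; infer_instance

def pvWitness_solution : List String × List Int :=
  (["classic", "pop", "classic", "classic", "pop"], [500, 600, 150, 800, 2500])

def Spec_solution (genres : List String) (plays : List Int) (out : List Int) : Prop := out = solution_alt genres plays
instance (genres : List String) (plays : List Int) (out : List Int) : Decidable (Spec_solution genres plays out) := by unfold Spec_solution; infer_instance

-- ===== CLAIM (what is proved, stated in full; the proofs are below) =====
def Claim_equal_solution : Prop := ∀ (genres : List String) (plays : List Int), Dom_solution genres plays → Pre_solution genres plays → Spec_solution genres plays (solution genres plays)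

-- ===== LEMMAS AND PROOFS =====

-- map commutes with a single stable insertion when the test factors through the map
theorem pv_insertBy_map {α β : Type} (b : β → β → Bool) (f : α → β) (x : α) (ys : List α) :
    PySem.List.insertBy b (f x) (ys.map f)
      = (PySem.List.insertBy (fun a c => b (f a) (f c)) x ys).map f := by
  induction ys with
  | nil => rfl
  | cons y ys ih =>
    simp only [List.map_cons, PySem.List.insertBy]
    by_cases h : b (f x) (f y)
    · simp [h]
    · simp [h, ih]

theorem pv_foldl_insertBy_map {α β : Type} (b : β → β → Bool) (f : α → β) :
    ∀ (l : List α) (acc : List α),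
      List.foldl (fun acc x => PySem.List.insertBy b x acc) (acc.map f) (l.map f)
        = (List.foldl (fun acc x => PySem.List.insertBy (fun a c => b (f a) (f c)) x acc) acc l).map f := by
  intro l
  induction l with
  | nil => intro acc; rfl
  | cons x l ih =>
    intro acc
    simp only [List.map_cons, List.foldl_cons]
    rw [pv_insertBy_map b f x acc, ih]

-- stable reverse-sort commutes with map when the key factors through the map
theorem pv_sorted_map {α β κ : Type} [LinearOrder κ] (k : β → κ) (f : α → β) (l : List α) :
    PySem.List.sorted (l.map f) k true
      = (PySem.List.sorted l (fun x => k (f x)) true).map f := by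
  rw [PySem.List.sorted_rev_eq_foldl_insertBy, PySem.List.sorted_rev_eq_foldl_insertBy]
  have h := pv_foldl_insertBy_map (fun a c : β => decide (k c < k a)) f l []
  simpa using h

-- inserting an element dominating the whole list puts it in front
theorem pv_insertBy_front {α κ : Type} [LinearOrder κ] (k : α → κ) (x : α) (zs : List α)
    (h : ∀ z ∈ zs, k z < k x) :
    PySem.List.insertBy (fun a c => decide (k c < k a)) x zs = x :: zs := by
  cases zs with
  | nil => rfl
  | cons z t =>
    simp only [PySem.List.insertBy]
    simp [h z (by simp)]

-- filtering a descending list commutes with one stable insertion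
theorem pv_filter_insertBy {α κ : Type} [LinearOrder κ] (k : α → κ) (p : α → Bool) (x : α) :
    ∀ (ys : List α), ys.Pairwise (fun a c => k c ≤ k a) →
      (PySem.List.insertBy (fun a c => decide (k c < k a)) x ys).filter p
        = if p x then PySem.List.insertBy (fun a c => decide (k c < k a)) x (ys.filter p)
          else ys.filter p := by
  intro ys
  induction ys with
  | nil =>
    intro _
    by_cases h : p x <;> simp [PySem.List.insertBy, List.filter, h]
  | cons y ys ih =>
    intro hp
    rw [List.pairwise_cons] at hp
    obtain ⟨hy, htail⟩ := hp
    by_cases hxy : k y < k x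
    · -- x goes in front of y
      have hfront : PySem.List.insertBy (fun a c => decide (k c < k a)) x ((y :: ys).filter p)
          = x :: (y :: ys).filter p := by
        apply pv_insertBy_front
        intro z hz
        have hz' : z ∈ y :: ys := List.mem_of_mem_filter hz
        rcases List.mem_cons.mp hz' with h | h
        · exact h ▸ hxy
        · exact lt_of_le_of_lt (hy z h) hxy
      have hins : PySem.List.insertBy (fun a c => decide (k c < k a)) x (y :: ys) = x :: y :: ys := by
        simp [PySem.List.insertBy, hxy]
      rw [hins, hfront, List.filter_cons]
    · -- x goes after y
      have hins : PySem.List.insertBy (fun a c => decide (k c < k a)) x (y :: ys)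
          = y :: PySem.List.insertBy (fun a c => decide (k c < k a)) x ys := by
        simp [PySem.List.insertBy, hxy]
      rw [hins]
      by_cases hpy : p y
      · rw [List.filter_cons, if_pos hpy, ih htail, List.filter_cons, if_pos hpy]
        by_cases hpx : p x
        · rw [if_pos hpx, if_pos hpx]
          simp [PySem.List.insertBy, hxy]
        · rw [if_neg hpx, if_neg hpx]
      · rw [List.filter_cons, if_neg hpy, ih htail, List.filter_cons, if_neg hpy]

-- one stable insertion keeps the list descending
theorem pv_insertBy_pairwise {α κ : Type} [LinearOrder κ] (k : α → κ) (x : α) :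
    ∀ (ys : List α), ys.Pairwise (fun a c => k c ≤ k a) →
      (PySem.List.insertBy (fun a c => decide (k c < k a)) x ys).Pairwise (fun a c => k c ≤ k a) := by
  intro ys
  induction ys with
  | nil => intro _; simp [PySem.List.insertBy]
  | cons y ys ih =>
    intro hp
    rw [List.pairwise_cons] at hp
    obtain ⟨hy, htail⟩ := hp
    by_cases hxy : k y < k x
    · simp only [PySem.List.insertBy, hxy, decide_true, if_true]
      refine List.pairwise_cons.mpr ⟨?_, List.pairwise_cons.mpr ⟨hy, htail⟩⟩
      intro z hz
      rcases List.mem_cons.mp hz with h | h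
      · exact le_of_lt (h ▸ hxy)
      · exact le_of_lt (lt_of_le_of_lt (hy z h) hxy)
    · simp only [PySem.List.insertBy, hxy, decide_false]
      refine List.pairwise_cons.mpr ⟨?_, ih htail⟩
      intro z hz
      rcases (PySem.List.mem_insertBy _ _ _ _).mp hz with h | h
      · exact h ▸ le_of_not_gt hxy
      · exact hy z h

theorem pv_foldl_insertBy_filter {α κ : Type} [LinearOrder κ] (k : α → κ) (p : α → Bool) :
    ∀ (l : List α) (acc : List α), acc.Pairwise (fun a c => k c ≤ k a) →
      (List.foldl (fun a x => PySem.List.insertBy (fun a c => decide (k c < k a)) x a) acc l).filter p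
        = List.foldl (fun a x => PySem.List.insertBy (fun a c => decide (k c < k a)) x a) (acc.filter p) (l.filter p) := by
  intro l
  induction l with
  | nil => intro acc _; rfl
  | cons x l ih =>
    intro acc hacc
    simp only [List.foldl_cons, List.filter_cons]
    rw [ih _ (pv_insertBy_pairwise k x acc hacc), pv_filter_insertBy k p x acc hacc]
    by_cases hpx : p x <;> simp [hpx]

-- the key fact behind B: filtering a stably reverse-sorted list = reverse-sorting the filtered list
theorem pv_sorted_filter {α κ : Type} [LinearOrder κ] (k : α → κ) (p : α → Bool) (l : List α) :
    (PySem.List.sorted l k true).filter p = PySem.List.sorted (l.filter p) k true := by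
  rw [PySem.List.sorted_rev_eq_foldl_insertBy, PySem.List.sorted_rev_eq_foldl_insertBy]
  have h := pv_foldl_insertBy_filter k p l [] (by simp)
  simpa using h


-- ----- facts specific to the two ports -----

-- A's paired loop splits into B's totals loop and a per-genre grouping loop
theorem pv_pairfold (genres : List String) (plays : List Int) :
    ∀ (l : List Int) (d1 : PySem.Dict String Int) (d2 : PySem.Dict String (List (Int × Int))),
      (∀ g, d1.contains g = d2.contains g) →
      List.foldl
        (fun (st : PySem.Dict String Int × PySem.Dict String (List (Int × Int))) i =>
          let genre := PySem.List.pyGetD genres i ""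
          let cnt := PySem.List.pyGetD plays i 0
          if st.1.contains genre then
            (st.1.insert genre (st.1.getD genre 0 + cnt),
             st.2.insert genre (st.2.getD genre [] ++ [(i, cnt)]))
          else
            (st.1.insert genre cnt, st.2.insert genre [(i, cnt)]))
        (d1, d2) l
      = (List.foldl (fun d i => d.insert (PySem.List.pyGetD genres i "")
                       (d.getD (PySem.List.pyGetD genres i "") 0 + PySem.List.pyGetD plays i 0)) d1 l,
         List.foldl (fun d i => d.insert (PySem.List.pyGetD genres i "")
                       (d.getD (PySem.List.pyGetD genres i "") [] ++ [(i, PySem.List.pyGetD plays i 0)])) d2 l) := by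
  intro l
  induction l with
  | nil => intro d1 d2 _; rfl
  | cons i l ih =>
    intro d1 d2 hc
    simp only [List.foldl_cons]
    have hstep :
        (if d1.contains (PySem.List.pyGetD genres i "") then
            (d1.insert (PySem.List.pyGetD genres i "")
               (d1.getD (PySem.List.pyGetD genres i "") 0 + PySem.List.pyGetD plays i 0),
             d2.insert (PySem.List.pyGetD genres i "")
               (d2.getD (PySem.List.pyGetD genres i "") [] ++ [(i, PySem.List.pyGetD plays i 0)]))
          else
            (d1.insert (PySem.List.pyGetD genres i "") (PySem.List.pyGetD plays i 0),
             d2.insert (PySem.List.pyGetD genres i "") [(i, PySem.List.pyGetD plays i 0)]))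
        = (d1.insert (PySem.List.pyGetD genres i "")
             (d1.getD (PySem.List.pyGetD genres i "") 0 + PySem.List.pyGetD plays i 0),
           d2.insert (PySem.List.pyGetD genres i "")
             (d2.getD (PySem.List.pyGetD genres i "") [] ++ [(i, PySem.List.pyGetD plays i 0)])) := by
      by_cases h : d1.contains (PySem.List.pyGetD genres i "")
      · simp [h]
      · have h2 : d2.contains (PySem.List.pyGetD genres i "") = false := by
          rw [← hc]; exact Bool.not_eq_true _ ▸ (by simpa using h)
        have h1 : d1.contains (PySem.List.pyGetD genres i "") = false := by
          simpa using h
        rw [PySem.Dict.getD_of_not_contains d1 _ h1, PySem.Dict.getD_of_not_contains d2 _ h2]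
        simp [h]
    rw [hstep]
    exact ih _ _ (by
      intro g
      rw [PySem.Dict.contains_insert, PySem.Dict.contains_insert, hc g])

-- the grouping loop's entry for any genre g: its songs, in index order
theorem pv_songs_getD (genres : List String) (plays : List Int) (g : String) :
    (List.foldl (fun (d : PySem.Dict String (List (Int × Int))) i =>
        d.insert (PySem.List.pyGetD genres i "")
          (d.getD (PySem.List.pyGetD genres i "") [] ++ [(i, PySem.List.pyGetD plays i 0)]))
      PySem.Dict.empty (PySem.List.pyRange 0 (genres.length : Int) 1)).getD g []
    = ((PySem.List.pyRange 0 (genres.length : Int) 1).filter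
          (fun i => PySem.List.pyGetD genres i "" == g)).map
        (fun i => (i, PySem.List.pyGetD plays i 0)) := by
  have hfold :
      List.foldl (fun (d : PySem.Dict String (List (Int × Int))) i =>
          d.insert (PySem.List.pyGetD genres i "")
            (d.getD (PySem.List.pyGetD genres i "") [] ++ [(i, PySem.List.pyGetD plays i 0)]))
        PySem.Dict.empty (PySem.List.pyRange 0 (genres.length : Int) 1)
      = List.foldl (fun (d : PySem.Dict String (List (Int × Int))) p =>
            d.modify p.1 [] (fun v => v ++ [p.2]))
          PySem.Dict.empty
          ((PySem.List.pyRange 0 (genres.length : Int) 1).map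
            (fun i => (PySem.List.pyGetD genres i "", (i, PySem.List.pyGetD plays i 0)))) := by
    rw [List.foldl_map]
    rfl
  rw [hfold, PySem.Dict.getD_foldl_modify_append]
  rw [List.filter_map]
  simp [Function.comp_def, List.map_map]

-- A's two-way take-2 branch is a take 2 + map fst
theorem pv_block (s : List (Int × Int)) (answer : List Int) :
    (if s.length < 2 then s.foldl (fun ans p => ans ++ [p.1]) answer
     else (PySem.List.pyRange 0 2 1).foldl
            (fun ans i => ans ++ [(PySem.List.pyGetD s i (0, 0)).1]) answer)
    = answer ++ (s.take 2).map (fun p => p.1) := by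
  match s with
  | [] => simp
  | [a] => simp
  | a :: b :: t =>
    have hlen : ¬ (a :: b :: t).length < 2 := by simp
    have hr : PySem.List.pyRange 0 2 1 = ([0, 1] : List Int) := by decide
    rw [if_neg hlen, hr]
    have h0 : PySem.List.pyGetD (a :: b :: t) 0 (0, 0) = a := PySem.List.pyGetD_zero_cons _ _ _
    have h1 : PySem.List.pyGetD (a :: b :: t) 1 (0, 0) = b := by
      have : PySem.List.pyGetD (a :: b :: t) ((1 : Nat) : Int) (0, 0) = (a :: b :: t).getD 1 (0, 0) :=
        PySem.List.pyGetD_natCast _ _ _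
      simpa using this
    simp [h0, h1]

-- per-genre: A's sorted per-genre song list projects to B's filtered global order
theorem pv_step (genres : List String) (plays : List Int) (g : String) (answer : List Int) :
    (let s := PySem.List.sorted
        (((PySem.List.pyRange 0 (genres.length : Int) 1).filter
            (fun i => PySem.List.pyGetD genres i "" == g)).map
          (fun i => (i, PySem.List.pyGetD plays i 0)))
        (fun x => x.2) true
     if s.length < 2 then s.foldl (fun ans p => ans ++ [p.1]) answer
     else (PySem.List.pyRange 0 2 1).foldl
            (fun ans i => ans ++ [(PySem.List.pyGetD s i (0, 0)).1]) answer)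
    = answer ++ (((PySem.List.sorted (PySem.List.pyRange 0 (genres.length : Int) 1)
        (fun i => PySem.List.pyGetD plays i 0) true).filter
          (fun i => PySem.List.pyGetD genres i "" == g)).take 2) := by
  rw [pv_block]
  rw [pv_sorted_map (fun x : Int × Int => x.2) (fun i => (i, PySem.List.pyGetD plays i 0))]
  rw [← List.map_take, List.map_map]
  rw [pv_sorted_filter (fun i => PySem.List.pyGetD plays i 0)
        (fun i => PySem.List.pyGetD genres i "" == g)]
  simp [Function.comp_def]

-- B's capped one-pass grouping: its entry for g is the first two g-indices of the scanned list
theorem pv_top2_getD (genres : List String) :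
    ∀ (l : List Int) (d : PySem.Dict String (List Int)),
      (∀ g', ((d.getD g' []).length ≤ 2)) →
      ∀ g, (List.foldl
              (fun (d : PySem.Dict String (List Int)) i =>
                let cur := d.getD (PySem.List.pyGetD genres i "") []
                if cur.length < 2 then d.insert (PySem.List.pyGetD genres i "") (cur ++ [i]) else d)
              d l).getD g []
            = (d.getD g [] ++ l.filter (fun i => PySem.List.pyGetD genres i "" == g)).take 2 := by
  intro l
  induction l with
  | nil =>
    intro d hlen g
    simp [List.take_of_length_le (hlen g)]
  | cons i l ih =>
    intro d hlen g
    simp only [List.foldl_cons, List.filter_cons]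
    by_cases hc : (d.getD (PySem.List.pyGetD genres i "") []).length < 2
    · simp only [hc, if_true]
      have hlen' : ∀ g', (((d.insert (PySem.List.pyGetD genres i "")
            (d.getD (PySem.List.pyGetD genres i "") [] ++ [i])).getD g' []).length ≤ 2) := by
        intro g'
        rw [PySem.Dict.getD_insert]
        by_cases hg : g' = PySem.List.pyGetD genres i ""
        · simp only [hg, if_true]
          simp only [List.length_append, List.length_singleton]
          omega
        · simp only [hg, if_false]
          exact hlen g'
      rw [ih _ hlen' g, PySem.Dict.getD_insert]
      by_cases hg : g = PySem.List.pyGetD genres i ""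
      · simp [hg]
      · have hb : (PySem.List.pyGetD genres i "" == g) = false := by
          rw [beq_eq_false_iff_ne]
          exact fun h => hg h.symm
        simp [hg, hb]
    · simp only [hc, if_false]
      rw [ih _ hlen g]
      by_cases hg : g = PySem.List.pyGetD genres i ""
      · have hb : (PySem.List.pyGetD genres i "" == g) = true := by simp [hg]
        have h2 : 2 ≤ (d.getD g []).length := by rw [hg]; omega
        simp only [hb, if_true]
        rw [List.take_append_of_le_length h2, List.take_append_of_le_length h2]
      · have hb : (PySem.List.pyGetD genres i "" == g) = false := by
          rw [beq_eq_false_iff_ne]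
          exact fun h => hg h.symm
        simp [hb]

-- ===== VERDICT (by name: the statement is the Claim_ definition above) =====
theorem solution_spec : Claim_equal_solution := by
  intro genres plays _ _
  show solution genres plays = solution_alt genres plays
  simp only [solution, solution_alt]
  rw [pv_pairfold genres plays _ PySem.Dict.empty PySem.Dict.empty (fun g => rfl)]
  apply List.foldl_ext
  intro answer gi _
  rw [pv_songs_getD genres plays gi.1,
      pv_top2_getD genres _ PySem.Dict.empty (by intro g'; simp) gi.1]
  have h := pv_step genres plays gi.1 answer
  simpa using h
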